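-- pv_equiv track=rewrite | github.com/Zenaida20/AdP-basic-Zenaida20 | Sesion04/TareaSesion4_Lab1_procesamiento.py | analizar_ventas
-- ===== SOURCE A (Python) =====
-- def analizar_ventas(ventas, umbral):
--
-- # 1. Inicializar variables
--     total_ventas = 0
--     venta_maxima = ventas[0] if ventas else 0
--     ventas_altas = 0
--
--     # 2. Procesar cada venta
--     for venta in ventas:
--         # 2.1 Ventas totales
--         total_ventas += venta
--
--         # 2.2 Venta máxima
--         if venta > venta_maxima:
--             venta_maxima = venta
--
--         # 2.3 Venta mas alta
--         if venta > umbral: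
--             ventas_altas += 1
--
--     # Retornar resultados
--     return {
--         "total": total_ventas,
--         "maxima": venta_maxima,
--         "num_ventas_altas": ventas_altas
--     }
-- ===== SOURCE B (Python) =====
-- def analizar_ventas(ventas, umbral):
--     total = sum(ventas)
--     maxima = max(ventas) if ventas else 0
--     num_ventas_altas = sum(1 for v in ventas if v > umbral)
--     return {
--         "total": total,
--         "maxima": maxima,
--         "num_ventas_altas": num_ventas_altas
--     }
-- ===== Notes on version B (the rewrite author's own statement) =====
-- stated objective: idiomatic
-- what changed: Replaces the fused accumulator loop by three separate built-in scans: sum(ventas), max(ventas) with an empty-list guard, and a counting generator expression.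
import Mathlib
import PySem

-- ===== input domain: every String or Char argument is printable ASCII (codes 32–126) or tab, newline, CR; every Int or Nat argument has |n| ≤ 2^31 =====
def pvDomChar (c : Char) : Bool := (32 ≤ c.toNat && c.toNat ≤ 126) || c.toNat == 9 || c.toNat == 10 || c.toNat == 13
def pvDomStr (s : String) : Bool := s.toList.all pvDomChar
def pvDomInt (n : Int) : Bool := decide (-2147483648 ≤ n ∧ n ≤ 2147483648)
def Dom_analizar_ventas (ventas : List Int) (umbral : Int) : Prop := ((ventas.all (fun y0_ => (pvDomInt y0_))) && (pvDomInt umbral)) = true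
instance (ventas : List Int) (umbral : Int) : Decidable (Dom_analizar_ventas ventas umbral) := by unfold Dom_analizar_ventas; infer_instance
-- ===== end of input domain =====

-- ===== PORT A =====
-- A: one fused loop maintaining (total, running max seeded with ventas[0] or 0, count above umbral).
def analizar_ventas (ventas : List Int) (umbral : Int) : List (String × Int) :=
  let venta_maxima0 : Int := match ventas with | [] => 0 | v :: _ => v
  let s := ventas.foldl
    (fun (st : Int × Int × Int) venta =>
      (st.1 + venta,
       (if venta > st.2.1 then venta else st.2.1),
       (if venta > umbral then st.2.2 + 1 else st.2.2)))
    (0, venta_maxima0, 0)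
  [("total", s.1), ("maxima", s.2.1), ("num_ventas_altas", s.2.2)]

-- ===== PORT B =====
-- B (idiomatic): three separate scans — sum, guarded max, and a count.
def analizar_ventas_alt (ventas : List Int) (umbral : Int) : List (String × Int) :=
  let total : Int := ventas.sum
  let maxima : Int := if ventas ≠ [] then (PySem.List.max? ventas (fun y => y)).getD 0 else 0
  let num_ventas_altas : Int := (ventas.countP (fun v => decide (v > umbral)) : Nat)
  [("total", total), ("maxima", maxima), ("num_ventas_altas", num_ventas_altas)]

-- ===== PRECONDITION & SPEC =====
def Spec_analizar_ventas (ventas : List Int) (umbral : Int) (out : List (String × Int)) : Prop := out = analizar_ventas_alt ventas umbral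
instance (ventas : List Int) (umbral : Int) (out : List (String × Int)) : Decidable (Spec_analizar_ventas ventas umbral out) := by unfold Spec_analizar_ventas; infer_instance

-- ===== CLAIM (what is proved, stated in full; the proofs are below) =====
def Claim_equal_analizar_ventas : Prop := ∀ (ventas : List Int) (umbral : Int), Dom_analizar_ventas ventas umbral → Spec_analizar_ventas ventas umbral (analizar_ventas ventas umbral)

-- ===== LEMMAS AND PROOFS =====

-- ===== VERDICT (by name: the statement is the Claim_ definition above) =====
lemma fold_char (umbral : Int) (l : List Int) (t m c : Int) :
    l.foldl
      (fun (st : Int × Int × Int) venta =>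
        (st.1 + venta,
         (if venta > st.2.1 then venta else st.2.1),
         (if venta > umbral then st.2.2 + 1 else st.2.2)))
      (t, m, c)
    = (t + l.sum, l.foldl max m, c + (l.countP (fun v => decide (v > umbral)) : Nat)) := by
  induction l generalizing t m c with
  | nil => simp
  | cons x xs ih =>
    simp only [List.foldl_cons, List.sum_cons, List.countP_cons, ih]
    have hm : (if x > m then x else m) = max m x := by
      rw [max_def]; split_ifs <;> omega
    rw [hm]
    by_cases h : x > umbral <;>
      simp [h, Int.add_comm, Int.add_assoc, Int.add_left_comm]

theorem analizar_ventas_spec : Claim_equal_analizar_ventas := by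
  intro ventas umbral _
  unfold Spec_analizar_ventas analizar_ventas analizar_ventas_alt
  cases ventas with
  | nil => simp
  | cons v vs =>
    simp only [fold_char, PySem.List.max?_id_cons]
    simp
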